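-- pv_equiv track=rewrite | github.com/matthewmendoza75/AOC | Reponse_07.py | evaluate_with_pruning
-- ===== SOURCE A (Python) =====
-- def evaluate_with_pruning(numbers, target, current_value, index): # recursion
--     if index == len(numbers):
--         return current_value == target
--
--     # Stop exploring if the current value exceeds the target
--     if current_value > target:
--         return False # careful if ones exist since adding can result in bigger then multiplying
--                      # but it seems theres no cases where it happens.
--
--     if evaluate_with_pruning(numbers, target, current_value + numbers[index], index + 1):
--         return True
--
--     if evaluate_with_pruning(numbers, target, current_value * numbers[index], index + 1):
--         return True
--
--     return False
-- ===== SOURCE B (Python) =====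
-- def evaluate_with_pruning(numbers, target, current_value, index):
--     # Iterative breadth-by-index pass over the deduplicated set of reachable values.
--     frontier = {current_value}
--     for i in range(index, len(numbers)):
--         live = {v for v in frontier if v <= target}
--         if not live:
--             return False
--         num = numbers[i]
--         frontier = {r for v in live for r in (v + num, v * num)}
--     return target in frontier
-- ===== Notes on version B (the rewrite author's own statement) =====
-- stated objective: alternative
-- what changed: Replaced the branching recursion by an iterative breadth-by-index loop that carries a deduplicated set of reachable values (applying the same v>target prune before each expansion) and tests target membership at the end.
import Mathlib
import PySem

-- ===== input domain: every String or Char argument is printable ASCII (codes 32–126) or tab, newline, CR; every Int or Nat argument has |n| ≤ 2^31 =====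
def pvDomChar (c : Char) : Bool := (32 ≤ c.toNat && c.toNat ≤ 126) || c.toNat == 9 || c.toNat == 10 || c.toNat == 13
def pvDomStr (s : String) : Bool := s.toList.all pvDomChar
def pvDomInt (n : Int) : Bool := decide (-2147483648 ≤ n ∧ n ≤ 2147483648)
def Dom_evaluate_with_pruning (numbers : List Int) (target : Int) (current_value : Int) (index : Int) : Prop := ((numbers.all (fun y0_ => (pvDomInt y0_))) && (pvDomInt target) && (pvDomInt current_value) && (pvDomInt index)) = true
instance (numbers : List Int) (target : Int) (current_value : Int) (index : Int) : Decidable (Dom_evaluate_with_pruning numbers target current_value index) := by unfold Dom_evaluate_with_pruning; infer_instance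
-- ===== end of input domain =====

-- B replaces A's branching recursion by an iterative pass that keeps a deduplicated
-- set of reachable values (with the same prune) and tests target membership at the end.


-- ===== PORT A =====
def evaluate_with_pruning (numbers : List Int) (target : Int) (current_value : Int) (index : Int) : Bool :=
  if index = (numbers.length : Int) then
    current_value == target
  else if current_value > target then
    false
  else
    match hg : PySem.List.pyGet? numbers index with
    | none => false  -- IndexError in Python; excluded by Pre_
    | some num =>
      evaluate_with_pruning numbers target (current_value + num) (index + 1) ||
      evaluate_with_pruning numbers target (current_value * num) (index + 1)
termination_by ((numbers.length : Int) + 1 - index).toNat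
decreasing_by
  all_goals
    have hne : PySem.List.pyGet? numbers index ≠ none := by simp [hg]
    rw [Ne, PySem.List.pyGet?_eq_none_iff] at hne
    have hr : -(numbers.length : Int) ≤ index ∧ index < numbers.length := by
      by_contra hc
      exact hne (by unfold PySem.Raise.InRange; omega)
    omega

-- ===== PORT B =====
-- the 'for i in range(index, len(numbers))' loop of Source B, with its early 'return False'
def pvB_loop (numbers : List Int) (target : Int) (frontier : List Int) (i : Int) : Bool :=
  if i < (numbers.length : Int) then
    let live := frontier.filter (fun v => decide (v ≤ target))
    if live = [] then false
    else
      match PySem.List.pyGet? numbers i with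
      | none => false  -- IndexError in Python; unreachable under Pre_
      | some num =>
        pvB_loop numbers target (PySem.Set.ofList (live.flatMap (fun v => [v + num, v * num]))) (i + 1)
  else
    frontier.contains target
termination_by ((numbers.length : Int) - i).toNat
decreasing_by omega

def evaluate_with_pruning_alt (numbers : List Int) (target : Int) (current_value : Int) (index : Int) : Bool :=
  pvB_loop numbers target (PySem.Set.ofList [current_value]) index

-- ===== PRECONDITION & SPEC =====
-- Pre_ excludes exactly the inputs where Python A raises IndexError: index strictly outside
-- [-len, len] while the prune (current_value > target) does not stop the recursion first.
def Pre_evaluate_with_pruning (numbers : List Int) (target : Int) (current_value : Int) (index : Int) : Prop :=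
  (-(numbers.length : Int) ≤ index ∧ index ≤ numbers.length) ∨ target < current_value
instance (numbers : List Int) (target : Int) (current_value : Int) (index : Int) : Decidable (Pre_evaluate_with_pruning numbers target current_value index) := by unfold Pre_evaluate_with_pruning; infer_instance

def pvWitness_evaluate_with_pruning : List Int × Int × Int × Int := ([2, 3, 1], 9, 0, 0)

def Spec_evaluate_with_pruning (numbers : List Int) (target : Int) (current_value : Int) (index : Int) (out : Bool) : Prop := out = evaluate_with_pruning_alt numbers target current_value index
instance (numbers : List Int) (target : Int) (current_value : Int) (index : Int) (out : Bool) : Decidable (Spec_evaluate_with_pruning numbers target current_value index out) := by unfold Spec_evaluate_with_pruning; infer_instance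

-- ===== CLAIM (what is proved, stated in full; the proofs are below) =====
def Claim_equal_evaluate_with_pruning : Prop := ∀ (numbers : List Int) (target : Int) (current_value : Int) (index : Int), Dom_evaluate_with_pruning numbers target current_value index → Pre_evaluate_with_pruning numbers target current_value index → Spec_evaluate_with_pruning numbers target current_value index (evaluate_with_pruning numbers target current_value index)

-- ===== LEMMAS AND PROOFS =====

-- in range, A unfolds to: prune, then try both expansions at index + 1
theorem pvA_unfold_lt (numbers : List Int) (target v i : Int)
    (h2 : i < numbers.length) (num : Int)
    (hg : PySem.List.pyGet? numbers i = some num) :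
    evaluate_with_pruning numbers target v i =
      (decide (v ≤ target) &&
        (evaluate_with_pruning numbers target (v + num) (i + 1) ||
         evaluate_with_pruning numbers target (v * num) (i + 1))) := by
  rw [evaluate_with_pruning]
  have hne : ¬ i = (numbers.length : Int) := by omega
  simp only [hne, if_false]
  by_cases hv : v > target
  · simp [hv, show ¬ v ≤ target by omega]
  · simp only [hv, if_false, show decide (v ≤ target) = true by simp; omega, Bool.true_and]
    split <;> simp_all

theorem pvA_len (numbers : List Int) (target v : Int) :
    evaluate_with_pruning numbers target v (numbers.length : Int) = (v == target) := by
  rw [evaluate_with_pruning]; simp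

theorem pyGet?_isSome_of_inRange (numbers : List Int) (i : Int)
    (h1 : -(numbers.length : Int) ≤ i) (h2 : i < numbers.length) :
    ∃ num, PySem.List.pyGet? numbers i = some num := by
  cases hg : PySem.List.pyGet? numbers i with
  | some num => exact ⟨num, rfl⟩
  | none =>
    rw [PySem.List.pyGet?_eq_none_iff] at hg
    exact absurd (by unfold PySem.Raise.InRange; omega) hg

theorem contains_eq_any (F : List Int) (t : Int) :
    F.contains t = F.any (fun v => v == t) := by
  rw [Bool.eq_iff_iff]
  simp only [List.contains_iff_mem, List.any_eq_true, beq_iff_eq]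
  constructor
  · intro h; exact ⟨t, h, rfl⟩
  · rintro ⟨v, hv, rfl⟩; exact hv

theorem any_ofList_flatMap_pair (live : List Int) (num : Int) (g : Int → Bool) :
    (PySem.Set.ofList (live.flatMap (fun v => [v + num, v * num]))).any g
      = live.any (fun v => g (v + num) || g (v * num)) := by
  rw [Bool.eq_iff_iff]
  simp only [List.any_eq_true, PySem.Set.mem_ofList, List.mem_flatMap]
  constructor
  · rintro ⟨x, ⟨v, hv, hx⟩, hgx⟩
    refine ⟨v, hv, ?_⟩
    simp only [List.mem_cons, List.not_mem_nil, or_false] at hx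
    rcases hx with h | h <;> subst h <;> simp [hgx]
  · rintro ⟨v, hv, hg2⟩
    rcases Bool.or_eq_true_iff.mp hg2 with h | h
    · exact ⟨v + num, ⟨v, hv, by simp⟩, h⟩
    · exact ⟨v * num, ⟨v, hv, by simp⟩, h⟩

-- loop invariant: the frontier pass computes 'some frontier value succeeds in A'
theorem pvB_loop_eq_any (numbers : List Int) (target : Int) :
    ∀ (n : ℕ) (i : Int) (F : List Int),
      ((numbers.length : Int) - i).toNat = n →
      -(numbers.length : Int) ≤ i → i ≤ numbers.length →
      pvB_loop numbers target F i =
        F.any (fun v => evaluate_with_pruning numbers target v i) := by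
  intro n
  induction n with
  | zero =>
    intro i F hn h1 h2
    have hi : i = (numbers.length : Int) := by omega
    subst hi
    rw [pvB_loop]
    simp only [lt_irrefl, if_false]
    have hA : ∀ v : Int, evaluate_with_pruning numbers target v (numbers.length : Int) = (v == target) :=
      fun v => pvA_len numbers target v
    simp only [hA]
    exact contains_eq_any F target
  | succ n ih =>
    intro i F hn h1 h2
    have hlt : i < (numbers.length : Int) := by omega
    obtain ⟨num, hg⟩ := pyGet?_isSome_of_inRange numbers i h1 hlt
    rw [pvB_loop]
    simp only [hlt, if_true, hg]
    have hA : ∀ v, evaluate_with_pruning numbers target v i =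
        (decide (v ≤ target) &&
          (evaluate_with_pruning numbers target (v + num) (i + 1) ||
           evaluate_with_pruning numbers target (v * num) (i + 1))) :=
      fun v => pvA_unfold_lt numbers target v i hlt num hg
    simp only [hA, ← List.any_filter]
    by_cases hl : F.filter (fun v => decide (v ≤ target)) = []
    · simp [hl]
    · simp only [hl, if_false]
      rw [ih (i + 1) _ (by omega) (by omega) (by omega)]
      exact any_ofList_flatMap_pair _ num _

theorem singleton_any (f : Int → Bool) (x : Int) : (PySem.Set.ofList [x]).any f = f x := by
  simp [PySem.Set.ofList, PySem.Set.add]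

-- ===== VERDICT (by name: the statement is the Claim_ definition above) =====
theorem evaluate_with_pruning_spec : Claim_equal_evaluate_with_pruning := by
  intro numbers target current_value index _ hpre
  unfold Spec_evaluate_with_pruning evaluate_with_pruning_alt
  by_cases hin : -(numbers.length : Int) ≤ index ∧ index ≤ numbers.length
  · rw [pvB_loop_eq_any numbers target _ index _ rfl hin.1 hin.2, singleton_any]
  · -- Pre_ forces target < current_value here; both sides are false
    have hgt : target < current_value := by
      rcases hpre with h | h
      · exact absurd h hin
      · exact h
    have hA : evaluate_with_pruning numbers target current_value index = false := by
      rw [evaluate_with_pruning]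
      by_cases hi : index = (numbers.length : Int)
      · simp [hi, show current_value ≠ target by omega]
      · simp [hi, show current_value > target by omega]
    rw [hA, pvB_loop]
    by_cases hlt : index < (numbers.length : Int)
    · have hf : ([current_value].filter (fun v => decide (v ≤ target))) = [] := by
        simp [show ¬ current_value ≤ target by omega]
      simp only [hlt, if_true, PySem.Set.ofList]
      simp [hf]
    · simp [hlt, PySem.Set.ofList, PySem.Set.add]
      omega
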